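-- pv_equiv track=rewrite | github.com/Crispy-Mike/PPOIC | АОИС/1_лаба/laba1_functions.py | direct_code_32
-- ===== SOURCE A (Python) =====
-- TOTAL_BITS = 32
--
-- SIGN_BIT_INDEX = 0
--
-- MAGNITUDE_BITS = 31
--
-- MAX_SIGNED_INT32 = 2147483647
--
-- def create_bit_array(size=TOTAL_BITS):
--     """Создать массив битов заданного размера, заполненный нулями."""
--     return ["0"] * size
--
-- def decimal_to_binary(number, bits_count):
--     """Перевести десятичное число в двоичный массив (без знака)."""
--     if number < 0:
--         number = 0
--     result = create_bit_array(bits_count)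
--     index = 0
--     while number > 0 and index < bits_count:
--         result[bits_count - 1 - index] = str(number % 2)
--         number //= 2
--         index += 1
--     return result
--
-- def direct_code_32(number):
--     """
--     Получить прямой код числа (32 бита).
--     Бит 0 - знаковый, биты 1-31 - модуль.
--     """
--     result = create_bit_array(TOTAL_BITS)
--
--     if number < 0:
--         result[SIGN_BIT_INDEX] = "1"
--         magnitude = -number
--     else:
--         result[SIGN_BIT_INDEX] = "0"
--         magnitude = number
--
--     # Для MIN_SIGNED_INT32 модуль не помещается в 31 бит — ставим все 1
--     if magnitude > MAX_SIGNED_INT32: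
--         for index in range(1, TOTAL_BITS):
--             result[index] = "1"
--     else:
--         magnitude_bits = decimal_to_binary(magnitude, MAGNITUDE_BITS)
--         for index in range(MAGNITUDE_BITS):
--             result[index + 1] = magnitude_bits[index]
--
--     return result
-- ===== SOURCE B (Python) =====
-- def direct_code_32(number):
--     sign = "1" if number < 0 else "0"
--     magnitude = min(abs(number), 2147483647)
--     return list(sign + format(magnitude, "031b"))
-- ===== Notes on version B (the rewrite author's own statement) =====
-- stated objective: simpler
-- what changed: B drops A's mutable fixed-size bit array, the divide-by-two loop writing magnitude bits back-to-front by index, and the two index-copy loops; instead it clamps the magnitude with min(abs(number), MAX_SIGNED_INT32) and produces the whole codeword as one string via the sign character plus format(magnitude, '031b'), split into a character list.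
import Mathlib
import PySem

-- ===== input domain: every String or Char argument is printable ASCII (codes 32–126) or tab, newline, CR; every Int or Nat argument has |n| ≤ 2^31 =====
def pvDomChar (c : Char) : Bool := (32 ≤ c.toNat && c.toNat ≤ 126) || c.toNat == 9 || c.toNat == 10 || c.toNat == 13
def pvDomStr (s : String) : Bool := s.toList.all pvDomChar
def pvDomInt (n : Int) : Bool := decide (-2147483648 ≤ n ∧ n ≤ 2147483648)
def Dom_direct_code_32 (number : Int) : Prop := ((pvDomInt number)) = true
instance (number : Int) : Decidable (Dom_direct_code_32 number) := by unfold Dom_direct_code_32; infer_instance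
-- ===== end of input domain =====

-- B replaces A's mutable 32-slot array, the divide-by-2 index loop and the two copy loops by
-- one whole-word construction: sign char + the clamped magnitude formatted as a zero-padded
-- 31-digit binary string, split into characters: simpler.

-- ===== PORT A =====
def create_bit_array (size : Nat) : List String := List.replicate size "0"

-- the while-loop of decimal_to_binary
def pvD2BLoop (number : Int) (index : Nat) (bits_count : Nat) (result : List String) : List String :=
  if _h : number > 0 ∧ index < bits_count then
    pvD2BLoop (PySem.Int.floordiv number 2) (index + 1) bits_count
      (result.set (bits_count - 1 - index) (PySem.Int.toStr (PySem.Int.mod number 2)))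
  else result
termination_by bits_count - index
decreasing_by omega

def decimal_to_binary (number : Int) (bits_count : Nat) : List String :=
  let number := if number < 0 then 0 else number
  pvD2BLoop number 0 bits_count (create_bit_array bits_count)

def direct_code_32 (number : Int) : List String :=
  let result := create_bit_array 32
  let result := if number < 0 then result.set 0 "1" else result.set 0 "0"
  let magnitude := if number < 0 then -number else number
  if magnitude > 2147483647 then
    (List.range' 1 31).foldl (fun acc index => acc.set index "1") result
  else
    let magnitude_bits := decimal_to_binary magnitude 31
    (List.range 31).foldl (fun acc index => acc.set (index + 1) (magnitude_bits.getD index "")) result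

-- ===== PORT B =====
-- hand-written port of Python's format(m, 'b'): minimal binary digit string of m,
-- most significant digit first (empty for m = 0); exact for m : Nat
def pvBin (m : Nat) : List String :=
  if h : m = 0 then [] else pvBin (m / 2) ++ [if m % 2 = 1 then "1" else "0"]
termination_by m
decreasing_by exact Nat.div_lt_self (Nat.pos_of_ne_zero h) (by norm_num)

-- port of format(m, '031b'): left-pad the binary digits with '0' to width 31
def direct_code_32_alt (number : Int) : List String :=
  let sign := if number < 0 then "1" else "0"
  let magnitude := min number.natAbs 2147483647
  sign :: (List.replicate (31 - (pvBin magnitude).length) "0" ++ pvBin magnitude)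

-- ===== PRECONDITION & SPEC =====
def Spec_direct_code_32 (number : Int) (out : List String) : Prop := out = direct_code_32_alt number
instance (number : Int) (out : List String) : Decidable (Spec_direct_code_32 number out) := by unfold Spec_direct_code_32; infer_instance

-- ===== CLAIM (what is proved, stated in full; the proofs are below) =====
def Claim_equal_direct_code_32 : Prop := ∀ (number : Int), Dom_direct_code_32 number → Spec_direct_code_32 number (direct_code_32 number)

-- ===== LEMMAS AND PROOFS =====

-- bit k of m, as the string both programs emit
def pvBitStr (m k : Nat) : String := if (m >>> k) &&& 1 ≠ 0 then "1" else "0"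

lemma pvBitStr_half (n : Nat) (k : Nat) : pvBitStr (n / 2) k = pvBitStr n (k + 1) := by
  simp [pvBitStr, Nat.shiftRight_eq_div_pow, Nat.div_div_eq_div_mul, pow_succ, Nat.mul_comm]

lemma pvBin_ones (k : Nat) : pvBin (2 ^ k - 1) = List.replicate k "1" := by
  induction k with
  | zero => rw [pvBin]; simp
  | succ f ih =>
      have h1 : (2 : ℕ) ^ (f + 1) = 2 * 2 ^ f := by ring
      have h2 : (1 : ℕ) ≤ 2 ^ f := Nat.one_le_two_pow
      rw [pvBin, dif_neg (by omega)]
      rw [show (2 ^ (f + 1) - 1) / 2 = 2 ^ f - 1 by omega, ih]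
      rw [if_pos (by omega), List.replicate_succ']

lemma pvFloordiv_two_toNat (n : Int) (hn : 0 ≤ n) :
    (PySem.Int.floordiv n 2).toNat = n.toNat / 2 := by
  rw [show n = (n.toNat : ℤ) by omega]
  rw [show (2:ℤ) = ((2:ℕ):ℤ) from rfl, PySem.Int.floordiv_natCast]
  omega

lemma pvToStr_mod_two (n : Int) (hn : 0 ≤ n) :
    PySem.Int.toStr (PySem.Int.mod n 2) = pvBitStr n.toNat 0 := by
  have hbit : pvBitStr n.toNat 0 = if n.toNat % 2 = 0 then "0" else "1" := by
    simp only [pvBitStr, Nat.shiftRight_zero, Nat.and_one_is_mod]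
    by_cases h : n.toNat % 2 = 0 <;> simp [h]
  have hmod : PySem.Int.mod n 2 = ((n.toNat % 2 : ℕ) : ℤ) := by
    conv_lhs => rw [show n = (n.toNat : ℤ) by omega, show (2:ℤ) = ((2:ℕ):ℤ) from rfl]
    exact PySem.Int.mod_natCast _ _
  rw [hbit, hmod]
  rcases Nat.mod_two_eq_zero_or_one n.toNat with hm | hm <;> rw [hm] <;> simp <;> decide

lemma pvD2BLoop_eq (fuel : Nat) (n : Int) (idx : Nat) (result : List String)
    (hn : 0 ≤ n) (hlt : n.toNat < 2 ^ fuel) (hidx : idx + fuel = 31)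
    (hlen : result.length = 31)
    (hzero : ∀ p, p < fuel → result.getD p "" = "0") :
    pvD2BLoop n idx 31 result =
      (List.range 31).map (fun p => if p < fuel then pvBitStr n.toNat (fuel - 1 - p) else result.getD p "") := by
  induction fuel generalizing n idx result with
  | zero =>
      rw [pvD2BLoop, dif_neg (by omega)]
      refine (List.ext_getElem (by simpa using hlen.symm) ?_).symm
      intro i h1 h2
      simp only [List.getElem_map, List.getElem_range, Nat.not_lt_zero, if_false]
      rw [List.getD_eq_getElem?_getD, List.getElem?_eq_getElem (by omega)]
      rfl
  | succ f ih =>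
      by_cases hpos : n > 0
      · rw [pvD2BLoop, dif_pos ⟨hpos, by omega⟩]
        have h31 : 31 - 1 - idx = f := by omega
        have hmodlo := PySem.Int.mod_nonneg n (by norm_num : (0:Int) < 2)
        have hmodhi := PySem.Int.mod_lt n (by norm_num : (0:Int) < 2)
        have hdm := PySem.Int.floordiv_mul_add_mod n 2
        have hfd0 : 0 ≤ PySem.Int.floordiv n 2 := by omega
        have hfdt : (PySem.Int.floordiv n 2).toNat = n.toNat / 2 := pvFloordiv_two_toNat n hn
        have hpow : 2 ^ (f + 1) = 2 * 2 ^ f := by ring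
        have hfdlt : (PySem.Int.floordiv n 2).toNat < 2 ^ f := by
          rw [hfdt]; omega
        have hset : (result.set (31 - 1 - idx) (PySem.Int.toStr (PySem.Int.mod n 2))).length = 31 := by
          simpa using hlen
        have hzero' : ∀ p, p < f →
            (result.set (31 - 1 - idx) (PySem.Int.toStr (PySem.Int.mod n 2))).getD p "" = "0" := by
          intro p hp
          rw [List.getD_eq_getElem?_getD, List.getElem?_set_ne (by omega),
              ← List.getD_eq_getElem?_getD]
          exact hzero p (by omega)
        rw [ih (PySem.Int.floordiv n 2) (idx + 1) _ hfd0 hfdlt (by omega) hset hzero']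
        apply List.map_congr_left
        intro p hp
        have hp31 : p < 31 := List.mem_range.mp hp
        by_cases h1 : p < f
        · rw [if_pos h1, if_pos (by omega), hfdt, pvBitStr_half]
          congr 1
          omega
        · by_cases h2 : p = f
          · subst h2
            rw [if_neg (lt_irrefl _), if_pos (by omega)]
            rw [List.getD_eq_getElem?_getD, h31, List.getElem?_set_self (by omega)]
            simp only [Option.getD_some]
            rw [pvToStr_mod_two n hn]
            congr 1
            omega
          · rw [if_neg h1, if_neg (by omega)]
            rw [List.getD_eq_getElem?_getD, List.getD_eq_getElem?_getD,
                List.getElem?_set_ne (by omega)]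
      · have hz : n = 0 := by omega
        subst hz
        rw [pvD2BLoop, dif_neg (by simp)]
        refine (List.ext_getElem (by simpa using hlen.symm) ?_).symm
        intro i h1 h2
        simp only [List.getElem_map, List.getElem_range]
        by_cases hi : i < f + 1
        · rw [if_pos hi]
          have hz0 := hzero i hi
          rw [List.getD_eq_getElem?_getD, List.getElem?_eq_getElem (by omega)] at hz0
          simp only [Option.getD_some] at hz0
          rw [show pvBitStr (0:Int).toNat (f + 1 - 1 - i) = "0" from by simp [pvBitStr]]
          exact hz0.symm
        · rw [if_neg hi, List.getD_eq_getElem?_getD, List.getElem?_eq_getElem (by omega)]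
          rfl

-- left-padding the minimal binary digits to width k yields exactly the k fixed-width bits
lemma pvBin_pad (k : Nat) : ∀ m : Nat, m < 2 ^ k →
    List.replicate (k - (pvBin m).length) "0" ++ pvBin m =
      (List.range k).map (fun p => pvBitStr m (k - 1 - p)) := by
  induction k with
  | zero =>
      intro m hm
      interval_cases m
      rw [pvBin]
      simp
  | succ f ih =>
      intro m hm
      by_cases h0 : m = 0
      · subst h0
        rw [pvBin]
        refine List.ext_getElem (by simp) ?_
        intro i h1 h2
        simp [pvBitStr]
      · rw [pvBin, dif_neg h0]
        have hdiv : m / 2 < 2 ^ f := by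
          have : 2 ^ (f + 1) = 2 * 2 ^ f := by ring
          omega
        have hIH := ih (m / 2) hdiv
        have hlen : (pvBin (m / 2)).length ≤ f := by
          have := congrArg List.length hIH
          simp only [List.length_append, List.length_replicate, List.length_map,
            List.length_range] at this
          omega
        have hlens : (pvBin (m / 2) ++ [if m % 2 = 1 then "1" else "0"]).length
            = (pvBin (m / 2)).length + 1 := by simp
        rw [hlens, show f + 1 - ((pvBin (m / 2)).length + 1) = f - (pvBin (m / 2)).length by omega]
        have hmaps : (List.range f).map (fun p => pvBitStr m (f + 1 - 1 - p))
            = (List.range f).map (fun p => pvBitStr (m / 2) (f - 1 - p)) := by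
          apply List.map_congr_left
          intro p hp
          have hpf : p < f := List.mem_range.mp hp
          rw [pvBitStr_half, show (f - 1 - p) + 1 = f + 1 - 1 - p by omega]
        rw [List.range_succ, List.map_append, hmaps, ← hIH, ← List.append_assoc]
        congr 1
        simp only [List.map_cons, List.map_nil]
        congr 1
        simp only [pvBitStr, Nat.and_one_is_mod]
        rcases Nat.mod_two_eq_zero_or_one m with hm2 | hm2 <;> simp [hm2]

-- length of the index-copy fold
lemma pvCopyFold_length (n : Nat) (f : Nat → String) (r : List String) :
    ((List.range n).foldl (fun acc i => acc.set (i + 1) (f i)) r).length = r.length := by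
  induction n with
  | zero => rfl
  | succ k ih => rw [List.range_succ, List.foldl_append]; simpa using ih

-- elementwise characterisation of the index-copy fold
lemma pvCopyFold_getElem? (n : Nat) (f : Nat → String) (r : List String) (p : Nat) :
    ((List.range n).foldl (fun acc i => acc.set (i + 1) (f i)) r)[p]? =
      if 1 ≤ p ∧ p ≤ n then (if p < r.length then some (f (p - 1)) else none) else r[p]? := by
  induction n with
  | zero =>
      rw [List.range_zero, List.foldl_nil, if_neg (by omega)]
  | succ k ih =>
      rw [List.range_succ, List.foldl_append, List.foldl_cons, List.foldl_nil]
      rw [List.getElem?_set, pvCopyFold_length]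
      by_cases hp : k + 1 = p
      · subst hp
        rw [if_pos rfl, if_pos (by omega : 1 ≤ k + 1 ∧ k + 1 ≤ k + 1)]
        simp
      · rw [if_neg hp, ih]
        by_cases h1 : 1 ≤ p ∧ p ≤ k
        · rw [if_pos h1, if_pos (show 1 ≤ p ∧ p ≤ k + 1 by omega)]
        · rw [if_neg h1, if_neg (show ¬(1 ≤ p ∧ p ≤ k + 1) by omega)]

lemma direct_code_32_eq_alt (number : Int) (hdom : Dom_direct_code_32 number) :
    direct_code_32 number = direct_code_32_alt number := by
  have hb : -2147483648 ≤ number ∧ number ≤ 2147483648 := by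
    simpa [Dom_direct_code_32, pvDomInt] using hdom
  have hmag : (if number < 0 then -number else number) = (number.natAbs : Int) := by
    split <;> omega
  by_cases hover : (if number < 0 then -number else number) > 2147483647
  · -- overflow: magnitude is exactly 2^31; A writes all ones, B formats the clamped 2^31 - 1
    have hna : number.natAbs = 2147483648 := by
      rw [hmag] at hover; omega
    have h31 : pvBin 2147483647 = List.replicate 31 "1" := by
      rw [show (2147483647 : ℕ) = 2 ^ 31 - 1 by norm_num, pvBin_ones]
    have hmin' : min (2147483648 : ℕ) 2147483647 = 2147483647 := by norm_num
    simp only [direct_code_32, direct_code_32_alt, hmag, hna, hmin', h31]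
    rw [if_pos (show ((2147483648:ℕ):ℤ) > 2147483647 by norm_num)]
    by_cases hneg : number < 0
    · simp only [if_pos hneg]; decide
    · simp only [if_neg hneg]; decide
  · -- in-range magnitude: A's divide loop produces exactly B's padded format digits
    have hle : number.natAbs ≤ 2147483647 := by
      rw [hmag] at hover; omega
    have hmin : min number.natAbs 2147483647 = number.natAbs := by omega
    have hmb : decimal_to_binary (if number < 0 then -number else number) 31 =
        (List.range 31).map (fun p => pvBitStr number.natAbs (30 - p)) := by
      unfold decimal_to_binary
      rw [hmag]
      rw [if_neg (by omega : ¬ ((number.natAbs : Int) < 0))]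
      have hlt : ((number.natAbs : Int)).toNat < 2 ^ 31 := by
        rw [Int.toNat_natCast]; omega
      have hz : ∀ p, p < 31 → (create_bit_array 31).getD p "" = "0" := by
        intro p hp
        rw [List.getD_eq_getElem?_getD, show create_bit_array 31 = List.replicate 31 "0" from rfl,
            List.getElem?_replicate, if_pos hp]
        rfl
      have hloop := pvD2BLoop_eq 31 (number.natAbs : Int) 0 (create_bit_array 31)
        (by omega) hlt rfl (by simp [create_bit_array]) hz
      rw [hloop]
      apply List.map_congr_left
      intro p hp
      have hp31 : p < 31 := List.mem_range.mp hp
      rw [if_pos hp31, Int.toNat_natCast]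
    have hpad := pvBin_pad 31 number.natAbs (by omega)
    have halt : direct_code_32_alt number =
        (if number < 0 then "1" else "0") ::
          (List.range 31).map (fun p => pvBitStr number.natAbs (31 - 1 - p)) := by
      simp only [direct_code_32_alt]
      rw [hmin, hpad]
    rw [halt]
    simp only [direct_code_32]
    rw [if_neg hover, hmb]
    set sign := if number < 0 then "1" else "0" with hsign
    have hbase : (if number < 0 then (create_bit_array 32).set 0 "1" else (create_bit_array 32).set 0 "0")
        = (create_bit_array 32).set 0 sign := by
      rw [hsign]; split <;> rfl
    rw [hbase]
    apply List.ext_getElem?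
    intro p
    rw [pvCopyFold_getElem?]
    have hblen : ((create_bit_array 32).set 0 sign).length = 32 := by simp [create_bit_array]
    rw [hblen]
    by_cases h0 : p = 0
    · subst h0
      rw [if_neg (by omega)]
      rw [List.getElem?_set_self (by simp [create_bit_array]), List.getElem?_cons_zero]
    · by_cases h1 : p ≤ 31
      · obtain ⟨q, rfl⟩ : ∃ q, p = q + 1 := ⟨p - 1, by omega⟩
        rw [if_pos (by omega), if_pos (by omega), List.getElem?_cons_succ]
        rw [List.getElem?_map, List.getElem?_range (by omega : q < 31)]
        simp only [Option.map_some, Option.some.injEq, List.getD_eq_getElem?_getD,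
          List.getElem?_map, List.getElem?_range (by omega : q + 1 - 1 < 31)]
        simp only [Option.getD_some]
        rw [show 30 - (q + 1 - 1) = 31 - 1 - q by omega]
      · rw [if_neg (by omega)]
        rw [List.getElem?_eq_none (by rw [hblen]; omega), List.getElem?_eq_none (by simp; omega)]

-- ===== VERDICT (by name: the statement is the Claim_ definition above) =====
theorem direct_code_32_spec : Claim_equal_direct_code_32 := by
  intro number hdom
  unfold Spec_direct_code_32
  exact direct_code_32_eq_alt number hdom
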